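-- pv_equiv track=rewrite | github.com/frankieianmq/thesis | analyseLogs.py | extractInterTime
-- ===== SOURCE A (Python) =====
-- def extractInterTime(log, variable):
--     extractedLog = []
--     for x in log:
--         store = []
--         for y in x:
--             oldTime = 0
--             for z in y:
--                 if len(z) != 0:
--                     time = int(z[variable])
--                     if oldTime != time:
--                         store.append(time - oldTime)
--                         oldCalc = time - oldTime
--                         oldTime = time
--         extractedLog.append(store)
--     return extractedLog
-- ===== SOURCE B (Python) =====
-- def extractInterTime(log, variable):
--     result = []
--     for x in log:
--         store = []
--         for y in x:
--             seq = [0] + [int(z[variable]) for z in y if len(z) != 0]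
--             kept = seq[:1] + [b for a, b in zip(seq, seq[1:]) if b != a]
--             store += [b - a for a, b in zip(kept, kept[1:])]
--         result.append(store)
--     return result
-- ===== Notes on version B (the rewrite author's own statement) =====
-- stated objective: alternative
-- what changed: B removes A's stateful oldTime accumulator entirely: per inner sequence it builds seq = [0] + extracted times, collapses adjacent duplicates with a zip(seq, seq[1:]) filter that compares neighbours (not a running variable), and emits unconditional pairwise differences of the kept list via another zip.
import Mathlib
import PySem

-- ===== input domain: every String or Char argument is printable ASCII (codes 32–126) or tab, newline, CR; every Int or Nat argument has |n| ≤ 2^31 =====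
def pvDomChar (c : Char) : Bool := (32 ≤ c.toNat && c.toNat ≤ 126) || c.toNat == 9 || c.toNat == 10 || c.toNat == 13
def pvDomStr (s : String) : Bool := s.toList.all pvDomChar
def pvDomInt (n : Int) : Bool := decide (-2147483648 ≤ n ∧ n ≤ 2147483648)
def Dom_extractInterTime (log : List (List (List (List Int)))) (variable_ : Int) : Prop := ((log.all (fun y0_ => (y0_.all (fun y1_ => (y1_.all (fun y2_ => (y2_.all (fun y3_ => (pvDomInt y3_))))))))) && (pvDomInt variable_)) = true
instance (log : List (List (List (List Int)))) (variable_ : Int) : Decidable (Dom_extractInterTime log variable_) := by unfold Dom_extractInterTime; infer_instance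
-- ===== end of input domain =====

-- B replaces A's stateful oldTime scan with a stateless pipeline (prepend 0, adjacent-dedup via zip, pairwise differences via zip); objective: alternative decomposition, equal cost.

-- ===== PORT A =====
-- one step of A's innermost 'for z in y' loop; state = (store, oldTime)
def pvStepA (variable_ : Int) (p : List Int × Int) (z : List Int) : List Int × Int :=
  if z.length ≠ 0 then
    let time := PySem.List.pyGetD z variable_ 0   -- int(z[variable]); exact under Pre_
    if p.2 ≠ time then (p.1 ++ [time - p.2], time) else p
  else p

def extractInterTime (log : List (List (List (List Int)))) (variable_ : Int) : List (List Int) :=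
  log.foldl (fun extractedLog x =>
    extractedLog ++
      [x.foldl (fun store y => (y.foldl (pvStepA variable_) (store, 0)).1) []]) []

-- ===== PORT B =====
-- the times comprehension: [int(z[variable]) for z in y if len(z) != 0]
def pvTimes (variable_ : Int) (y : List (List Int)) : List Int :=
  y.filterMap (fun z => if z.length ≠ 0 then some (PySem.List.pyGetD z variable_ 0) else none)

-- kept = seq[:1] + [b for a, b in zip(seq, seq[1:]) if b != a]   (adjacent-duplicate collapse)
def pvKept (seq : List Int) : List Int :=
  seq.take 1 ++ (seq.zip (seq.drop 1)).filterMap (fun p => if p.2 ≠ p.1 then some p.2 else none)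

-- [b - a for a, b in zip(kept, kept[1:])]   (unconditional pairwise differences)
def pvAdjDiffs (l : List Int) : List Int :=
  (l.zip (l.drop 1)).map (fun p => p.2 - p.1)

def extractInterTime_alt (log : List (List (List (List Int)))) (variable_ : Int) : List (List Int) :=
  log.foldl (fun result x =>
    result ++ [x.foldl (fun store y => store ++ pvAdjDiffs (pvKept (0 :: pvTimes variable_ y))) []]) []

-- ===== PRECONDITION & SPEC =====
-- Pre_ excludes exactly the inputs where A raises IndexError: some nonempty z with variable_ out of Python index range.
def Pre_extractInterTime (log : List (List (List (List Int)))) (variable_ : Int) : Prop :=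
  ∀ x ∈ log, ∀ y ∈ x, ∀ z ∈ y, z.length ≠ 0 → PySem.Raise.InRange z.length variable_
instance (log : List (List (List (List Int)))) (variable_ : Int) : Decidable (Pre_extractInterTime log variable_) := by unfold Pre_extractInterTime; infer_instance

def pvWitness_extractInterTime : List (List (List (List Int))) × Int := ([[[[3], [3], [7], []]]], 0)

def Spec_extractInterTime (log : List (List (List (List Int)))) (variable_ : Int) (out : List (List Int)) : Prop := out = extractInterTime_alt log variable_
instance (log : List (List (List (List Int)))) (variable_ : Int) (out : List (List Int)) : Decidable (Spec_extractInterTime log variable_ out) := by unfold Spec_extractInterTime; infer_instance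

-- ===== CLAIM (what is proved, stated in full; the proofs are below) =====
def Claim_equal_extractInterTime : Prop := ∀ (log : List (List (List (List Int)))) (variable_ : Int), Dom_extractInterTime log variable_ → Pre_extractInterTime log variable_ → Spec_extractInterTime log variable_ (extractInterTime log variable_)

-- ===== LEMMAS AND PROOFS =====
-- proof helper: A's running-difference scan, as a recursion on the times list
def pvDiffs (prev : Int) : List Int → List Int
  | [] => []
  | t :: ts => if prev ≠ t then (t - prev) :: pvDiffs t ts else pvDiffs prev ts

-- the filtered-zip part of pvKept, with the head made explicit
def pvZipKeep (a : Int) (ts : List Int) : List Int :=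
  ((a :: ts).zip ts).filterMap (fun p => if p.2 ≠ p.1 then some p.2 else none)

theorem pvKept_cons (a : Int) (ts : List Int) : pvKept (a :: ts) = a :: pvZipKeep a ts := by
  simp [pvKept, pvZipKeep]

theorem pvZipKeep_cons (a t : Int) (ts : List Int) :
    pvZipKeep a (t :: ts) = if t ≠ a then t :: pvZipKeep t ts else pvZipKeep t ts := by
  by_cases h : t = a <;> simp [pvZipKeep, h]

theorem pvAdjDiffs_cons2 (a b : Int) (l : List Int) :
    pvAdjDiffs (a :: b :: l) = (b - a) :: pvAdjDiffs (b :: l) := by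
  simp [pvAdjDiffs]

-- B's pipeline over a :: ts equals A's running-difference scan starting at a
theorem pvPipeline_eq (ts : List Int) : ∀ a, pvAdjDiffs (pvKept (a :: ts)) = pvDiffs a ts := by
  induction ts with
  | nil => intro a; simp [pvKept_cons, pvZipKeep, pvAdjDiffs, pvDiffs]
  | cons t ts ih =>
    intro a
    rw [pvKept_cons, pvZipKeep_cons]
    by_cases h : t = a
    · subst h
      simp only [ne_eq, not_true_eq_false, if_false, pvDiffs]
      simpa [pvKept_cons] using ih t
    · have h' : t ≠ a := h
      simp only [h', if_pos, ne_eq, not_false_eq_true]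
      rw [pvAdjDiffs_cons2]
      have := ih t
      rw [pvKept_cons] at this
      simp [pvDiffs, this, Ne.symm h]
  
-- A's innermost loop = store ++ (running-difference scan over the extracted times), in the first component
theorem pvInner_eq (variable_ : Int) (y : List (List Int)) :
    ∀ (store : List Int) (old : Int),
      (y.foldl (pvStepA variable_) (store, old)).1 = store ++ pvDiffs old (pvTimes variable_ y) := by
  induction y with
  | nil => intro store old; simp [pvTimes, pvDiffs]
  | cons z ys ih =>
    intro store old
    by_cases hz : z.length ≠ 0
    · have hz' : ¬ z = [] := by simpa using hz
      by_cases ht : old ≠ PySem.List.pyGetD z variable_ 0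
      · simp [pvStepA, pvTimes, pvDiffs, hz, hz', ht, ih]
      · simp [pvStepA, pvTimes, pvDiffs, hz, hz', ht, ih]
    · have hz' : z = [] := by simpa using hz
      simp [pvStepA, pvTimes, hz', ih]

-- ===== VERDICT (by name: the statement is the Claim_ definition above) =====
theorem extractInterTime_spec : Claim_equal_extractInterTime := by
  intro log variable_ _ _
  unfold Spec_extractInterTime extractInterTime extractInterTime_alt
  have h : (fun (store : List Int) (y : List (List Int)) =>
      (y.foldl (pvStepA variable_) (store, 0)).1) =
      (fun store y => store ++ pvAdjDiffs (pvKept (0 :: pvTimes variable_ y))) := by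
    funext store y
    rw [pvInner_eq variable_ y store 0, pvPipeline_eq]
  rw [h]
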